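-- pv_equiv track=rewrite | github.com/MostFerrixx/Gemelos_Digital | enhanced_fallback_system.py | generate_warehouse_small_matrix
-- ===== SOURCE A (Python) =====
-- def generate_warehouse_small_matrix(width, height):
--     """Generar matriz de almacén pequeño"""
--     matrix = []
--
--     for y in range(height):
--         row = []
--         for x in range(width):
--             # Bordes como muros
--             if y == 0 or y == height-1 or x == 0 or x == width-1:
--                 tile = 0  # Suelo navegable en bordes
--             # Racks en patrón regular
--             elif y % 4 == 2 and 2 <= x <= width-3:
--                 if x % 4 in [1, 2]:
--                     tile = 0  # Racks (obstáculos)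
--                 else:
--                     tile = 1  # Pasillos entre racks
--             # Corredor principal horizontal
--             elif y == height // 2:
--                 tile = 1  # Corredor principal navegable
--             # Suelo navegable por defecto
--             else:
--                 tile = 1
--
--             row.append(tile)
--         matrix.append(row)
--
--     return matrix
-- ===== SOURCE B (Python) =====
-- def generate_warehouse_small_matrix(width, height):
--     """Generar matriz de almacen pequeno (bulk-fill then overwrite)"""
--     matrix = [[1] * width for _ in range(height)]
--     if height > 0 and width > 0:
--         matrix[0] = [0] * width
--         matrix[-1] = [0] * width
--         for row in matrix:
--             row[0] = 0
--             row[-1] = 0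
--     for y in range(2, height - 1, 4):
--         row = matrix[y]
--         for x in range(2, width - 2):
--             if x % 4 in (1, 2):
--                 row[x] = 0
--     return matrix
-- ===== Notes on version B (the rewrite author's own statement) =====
-- stated objective: alternative
-- what changed: Instead of deciding every cell with a per-cell if/elif chain inside a double loop, B allocates the full matrix as 1s by list repetition and then overwrites only the border rows/columns and the rack cells (every fourth interior row, interior x with x modulo 4 equal to one or two).
import Mathlib
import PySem

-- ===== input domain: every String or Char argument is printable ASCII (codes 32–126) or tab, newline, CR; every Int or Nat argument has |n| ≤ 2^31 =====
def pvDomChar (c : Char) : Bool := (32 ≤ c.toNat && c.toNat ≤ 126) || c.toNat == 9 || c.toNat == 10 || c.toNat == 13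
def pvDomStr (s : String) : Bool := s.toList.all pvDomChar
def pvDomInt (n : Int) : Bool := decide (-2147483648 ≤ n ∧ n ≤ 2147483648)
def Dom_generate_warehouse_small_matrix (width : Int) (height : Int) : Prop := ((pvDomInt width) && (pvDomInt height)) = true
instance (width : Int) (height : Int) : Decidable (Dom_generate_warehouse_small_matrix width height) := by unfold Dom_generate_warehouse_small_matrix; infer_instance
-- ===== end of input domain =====

-- B bulk-fills the matrix with 1s and overwrites only the border and rack cells, instead of
-- deciding every cell with A's per-cell branch chain; objective: simpler/alternative (same result).

-- B bulk-fills an all-1 matrix and overwrites only the border and rack cells, instead of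
-- deciding every cell with A's per-cell branch chain (objective: alternative decomposition).

-- ===== PORT A =====
-- literal transliteration of A: build each row cell by cell with the if/elif chain, appending
def generate_warehouse_small_matrix (width : Int) (height : Int) : List (List Int) :=
  (PySem.List.pyRange 0 height).foldl (fun matrix y =>
    matrix ++ [ (PySem.List.pyRange 0 width).foldl (fun row x =>
      row ++ [ if y = 0 ∨ y = height - 1 ∨ x = 0 ∨ x = width - 1 then (0 : Int)
               else if PySem.Int.mod y 4 = 2 ∧ 2 ≤ x ∧ x ≤ width - 3 then
                 (if PySem.Int.mod x 4 = 1 ∨ PySem.Int.mod x 4 = 2 then 0 else 1)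
               else if y = PySem.Int.floordiv height 2 then 1 else 1 ]) [] ]) []

-- ===== PORT B =====
-- inner loop of B: row[x] = 0 for x in range(2, width-2) with x % 4 in (1, 2)
-- (in-place element writes are List.set)
def pvRackRow (width : Int) (row : List Int) : List Int :=
  (PySem.List.pyRange 2 (width - 2)).foldl
    (fun r x => if PySem.Int.mod x 4 = 1 ∨ PySem.Int.mod x 4 = 2 then r.set x.toNat 0 else r) row

-- transliteration of B: [[1]*width for _ in range(height)] ([1]*width = replicate; empty for
-- width <= 0, exactly like Python), then overwrite first/last rows and first/last columns
-- (row[-1] is index width-1, matrix[-1] is index length-1), then the rack rows y in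
-- range(2, height-1, 4)
def generate_warehouse_small_matrix_alt (width : Int) (height : Int) : List (List Int) :=
  let matrix := (PySem.List.pyRange 0 height).map (fun _ => List.replicate width.toNat 1)
  let matrix2 :=
    if 0 < height ∧ 0 < width then
      ((matrix.set 0 (List.replicate width.toNat 0)).set (matrix.length - 1)
          (List.replicate width.toNat 0)).map
        (fun row => (row.set 0 0).set (width - 1).toNat 0)
    else matrix
  (PySem.List.pyRange 2 (height - 1) 4).foldl
    (fun m y => m.set y.toNat (pvRackRow width (m.getD y.toNat []))) matrix2

-- ===== PRECONDITION & SPEC =====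
def Spec_generate_warehouse_small_matrix (width : Int) (height : Int) (out : List (List Int)) : Prop := out = generate_warehouse_small_matrix_alt width height
instance (width : Int) (height : Int) (out : List (List Int)) : Decidable (Spec_generate_warehouse_small_matrix width height out) := by unfold Spec_generate_warehouse_small_matrix; infer_instance

-- ===== CLAIM (what is proved, stated in full; the proofs are below) =====
def Claim_equal_generate_warehouse_small_matrix : Prop := ∀ (width : Int) (height : Int), Dom_generate_warehouse_small_matrix width height → Spec_generate_warehouse_small_matrix width height (generate_warehouse_small_matrix width height)

-- ===== LEMMAS AND PROOFS =====

-- the value A computes for cell (x, y)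
def pvCell (w h y x : Int) : Int :=
  if y = 0 ∨ y = h - 1 ∨ x = 0 ∨ x = w - 1 then (0 : Int)
  else if PySem.Int.mod y 4 = 2 ∧ 2 ≤ x ∧ x ≤ w - 3 then
    (if PySem.Int.mod x 4 = 1 ∨ PySem.Int.mod x 4 = 2 then 0 else 1)
  else if y = PySem.Int.floordiv h 2 then 1 else 1

lemma pvCell_eq (w h y x : Int) : pvCell w h y x =
    if y = 0 ∨ y = h - 1 ∨ x = 0 ∨ x = w - 1 then 0
    else if PySem.Int.mod y 4 = 2 ∧ 2 ≤ x ∧ x ≤ w - 3 ∧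
        (PySem.Int.mod x 4 = 1 ∨ PySem.Int.mod x 4 = 2) then 0 else 1 := by
  unfold pvCell
  split_ifs <;> first | rfl | tauto

lemma pvRange_zero (h : Int) :
    PySem.List.pyRange 0 h = (List.range h.toNat).map (fun (k : Nat) => (k : Int)) := by
  rcases le_or_gt h 0 with hh | hh
  · have h0 : h.toNat = 0 := by omega
    rw [h0, PySem.List.pyRange_of_pos 0 h one_pos, if_neg (by omega)]
    simp
  · have h0 : h = (h.toNat : Int) := by omega
    conv_lhs => rw [h0, PySem.List.pyRange_zero_natCast]

lemma pvRange_len (h : Int) : (PySem.List.pyRange 0 h).length = h.toNat := by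
  rw [pvRange_zero]; simp

lemma pvRange_getElem (w : Int) (j : Nat) (hj : j < (PySem.List.pyRange 0 w).length) :
    (PySem.List.pyRange 0 w)[j] = (j : Int) := by
  have hj' : j < w.toNat := by rw [pvRange_len] at hj; exact hj
  simp only [pvRange_zero, List.getElem_map, List.getElem_range]

lemma pvRackNodup (h : Int) : ((PySem.List.pyRange 2 (h - 1) 4).map Int.toNat).Nodup := by
  rw [PySem.List.pyRange_of_pos _ _ (by norm_num : (0:Int) < 4), List.map_map]
  have he : (Int.toNat ∘ fun k : Nat => 2 + 4 * (k : Int)) = fun k : Nat => 2 + 4 * k := by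
    funext k; simp only [Function.comp]; omega
  rw [he]
  exact List.Nodup.map (fun a b hab => by omega) List.nodup_range

lemma pvRackMem (h : Int) (i : Nat) :
    (∃ y ∈ PySem.List.pyRange 2 (h - 1) 4, y.toNat = i) ↔
      (2 ≤ (i : Int) ∧ (i : Int) < h - 1 ∧ (4 : Int) ∣ (i : Int) - 2) := by
  constructor
  · rintro ⟨y, hy, rfl⟩
    rw [PySem.List.mem_pyRange_iff_of_pos (by norm_num : (0:Int) < 4)] at hy
    obtain ⟨h1, h2, h3⟩ := hy
    refine ⟨by omega, by omega, ?_⟩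
    obtain ⟨k, hk⟩ := h3
    exact ⟨k, by omega⟩
  · rintro ⟨h1, h2, h3⟩
    refine ⟨(i : Int), ?_, by omega⟩
    rw [PySem.List.mem_pyRange_iff_of_pos (by norm_num : (0:Int) < 4)]
    exact ⟨h1, h2, h3⟩

lemma pvInnerMem (w : Int) (j : Nat) :
    (∃ x ∈ PySem.List.pyRange 2 (w - 2),
        (PySem.Int.mod x 4 = 1 ∨ PySem.Int.mod x 4 = 2) ∧ x.toNat = j) ↔
      (2 ≤ (j : Int) ∧ (j : Int) < w - 2 ∧
        ((j : Int) % 4 = 1 ∨ (j : Int) % 4 = 2)) := by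
  constructor
  · rintro ⟨x, hx, hm, rfl⟩
    rw [PySem.List.mem_pyRange_iff_of_pos one_pos] at hx
    obtain ⟨h1, h2, _⟩ := hx
    rw [PySem.Int.mod_eq_emod_of_pos (by norm_num : (0:Int) < 4)] at hm
    refine ⟨by omega, by omega, by omega⟩
  · rintro ⟨h1, h2, h3⟩
    refine ⟨(j : Int), ?_, ?_, by omega⟩
    · rw [PySem.List.mem_pyRange_iff_of_pos one_pos]
      exact ⟨h1, h2, one_dvd _⟩
    · rw [PySem.Int.mod_eq_emod_of_pos (by norm_num : (0:Int) < 4)]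
      exact h3



-- generic conditional-set fold (inner rack loop)

lemma pvCondset_getD (c : Int → Prop) [DecidablePred c] :
    ∀ (ys : List Int) (r : List Int) (j : Nat),
      (ys.foldl (fun r x => if c x then r.set x.toNat 0 else r) r).getD j 0
        = if ∃ x ∈ ys, c x ∧ x.toNat = j then (0 : Int) else r.getD j 0 := by
  intro ys
  induction ys with
  | nil => intro r j; simp
  | cons x0 rest ih =>
    intro r j
    rw [List.foldl_cons, ih]
    by_cases hc : c x0
    · rw [if_pos hc]
      by_cases hx : x0.toNat = j
      · have hmem : ∃ x ∈ x0 :: rest, c x ∧ x.toNat = j := ⟨x0, List.mem_cons_self, hc, hx⟩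
        rw [if_pos hmem]
        split_ifs with hr
        · rfl
        · subst hx
          rcases Nat.lt_or_ge x0.toNat r.length with hlt | hge
          · rw [List.getD_eq_getElem?_getD, List.getElem?_set_self hlt]; rfl
          · rw [List.getD_eq_getElem?_getD,
              List.getElem?_eq_none (by simpa [List.length_set] using hge)]; rfl
      · have hiff : (∃ x ∈ x0 :: rest, c x ∧ x.toNat = j) ↔ (∃ x ∈ rest, c x ∧ x.toNat = j) := by
          constructor
          · rintro ⟨x, hxm, hcx, hxe⟩
            rcases List.mem_cons.mp hxm with rfl | hm
            · exact absurd hxe hx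
            · exact ⟨x, hm, hcx, hxe⟩
          · rintro ⟨x, hm, hcx, hxe⟩; exact ⟨x, List.mem_cons_of_mem _ hm, hcx, hxe⟩
        simp only [hiff]
        split_ifs with hr
        · rfl
        · rw [List.getD_eq_getElem?_getD, List.getD_eq_getElem?_getD, List.getElem?_set_ne hx]
    · rw [if_neg hc]
      have hiff : (∃ x ∈ x0 :: rest, c x ∧ x.toNat = j) ↔ (∃ x ∈ rest, c x ∧ x.toNat = j) := by
        constructor
        · rintro ⟨x, hxm, hcx, hxe⟩
          rcases List.mem_cons.mp hxm with rfl | hm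
          · exact absurd hcx hc
          · exact ⟨x, hm, hcx, hxe⟩
        · rintro ⟨x, hm, hcx, hxe⟩; exact ⟨x, List.mem_cons_of_mem _ hm, hcx, hxe⟩
      simp only [hiff]

lemma pvCondset_length (c : Int → Prop) [DecidablePred c] :
    ∀ (ys : List Int) (r : List Int),
      (ys.foldl (fun r x => if c x then r.set x.toNat 0 else r) r).length = r.length := by
  intro ys
  induction ys with
  | nil => intro r; rfl
  | cons x rest ih => intro r; rw [List.foldl_cons, ih]; split <;> simp

-- generic row-update fold (outer rack loop)

lemma pvUpdate_length (f : List Int → List Int) :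
    ∀ (ys : List Int) (m : List (List Int)),
      (ys.foldl (fun m y => m.set y.toNat (f (m.getD y.toNat []))) m).length = m.length := by
  intro ys
  induction ys with
  | nil => intro m; rfl
  | cons y rest ih => intro m; rw [List.foldl_cons, ih]; simp

lemma pvUpdate_getD (f : List Int → List Int) :
    ∀ (ys : List Int) (m : List (List Int)) (i : Nat), (ys.map Int.toNat).Nodup →
      (ys.foldl (fun m y => m.set y.toNat (f (m.getD y.toNat []))) m).getD i []
        = if (∃ y ∈ ys, y.toNat = i) ∧ i < m.length then f (m.getD i []) else m.getD i [] := by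
  intro ys
  induction ys with
  | nil => intro m i _; simp
  | cons y0 rest ih =>
    intro m i hnd
    have hnd' : (rest.map Int.toNat).Nodup := by
      rw [List.map_cons] at hnd; exact hnd.of_cons
    rw [List.foldl_cons, ih _ _ hnd', List.length_set]
    by_cases hi : y0.toNat = i
    · have hni : ¬ ∃ y ∈ rest, y.toNat = i := by
        rintro ⟨y, hy, rfl⟩
        rw [List.map_cons] at hnd
        exact (List.nodup_cons.mp hnd).1 (by rw [hi]; exact List.mem_map_of_mem hy)
      have hmem : ∃ y ∈ y0 :: rest, y.toNat = i := ⟨y0, List.mem_cons_self, hi⟩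
      rw [if_neg (by rintro ⟨h1, _⟩; exact hni h1)]
      by_cases hlt : i < m.length
      · rw [if_pos ⟨hmem, hlt⟩, List.getD_eq_getElem?_getD, hi,
          List.getElem?_set_self (by rwa [hi] at *), Option.getD_some]
      · rw [if_neg (by rintro ⟨_, h2⟩; exact hlt h2)]
        have h1 : (m.set y0.toNat (f (m.getD y0.toNat []))).getD i [] = ([] : List Int) := by
          rw [List.getD_eq_getElem?_getD, List.getElem?_eq_none (by simp [List.length_set]; omega)]
          rfl
        have h2 : m.getD i [] = ([] : List Int) := by
          rw [List.getD_eq_getElem?_getD, List.getElem?_eq_none (by omega)]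
          rfl
        rw [h1, h2]
    · have hiff : (∃ y ∈ y0 :: rest, y.toNat = i) ↔ (∃ y ∈ rest, y.toNat = i) := by
        constructor
        · rintro ⟨y, hym, hye⟩
          rcases List.mem_cons.mp hym with rfl | hm
          · exact absurd hye hi
          · exact ⟨y, hm, hye⟩
        · rintro ⟨y, hm, hye⟩; exact ⟨y, List.mem_cons_of_mem _ hm, hye⟩
      have hset : (m.set y0.toNat (f (m.getD y0.toNat []))).getD i []
          = m.getD i [] := by
        simp only [List.getD_eq_getElem?_getD, List.getElem?_set_ne hi]
      simp only [hiff, hset]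

lemma pvRack_empty (w : Int) (hw : w ≤ 0) : pvRackRow w [] = [] := by
  unfold pvRackRow
  rw [PySem.List.pyRange_of_pos _ _ one_pos, if_neg (by omega)]
  rfl

lemma pvA_eq_map (w h : Int) :
    generate_warehouse_small_matrix w h
      = (PySem.List.pyRange 0 h).map (fun y => (PySem.List.pyRange 0 w).map (pvCell w h y)) := by
  unfold generate_warehouse_small_matrix
  simp only [PySem.List.foldl_append_singleton_eq_map, List.nil_append]
  rfl

lemma pvB_eq_map (w h : Int) :
    generate_warehouse_small_matrix_alt w h
      = (PySem.List.pyRange 0 h).map (fun y => (PySem.List.pyRange 0 w).map (pvCell w h y)) := by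
  have hnd := pvRackNodup h
  have hm4 : (0:Int) < 4 := by norm_num
  unfold generate_warehouse_small_matrix_alt
  dsimp only
  apply List.ext_getElem
  · rw [pvUpdate_length]
    split_ifs <;> simp
  · intro i hi1 hi2
    have hih : i < h.toNat := by
      rw [pvUpdate_length] at hi1
      split_ifs at hi1 <;> simpa [pvRange_len] using hi1
    have hh0 : 0 < h := by omega
    rw [← List.getD_eq_getElem _ ([] : List Int) hi1,
      List.getElem_map, pvRange_getElem h i (by rwa [pvRange_len]),
      pvUpdate_getD (pvRackRow w) _ _ i hnd]
    by_cases hpos : 0 < h ∧ 0 < w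
    · rw [if_pos hpos]
      -- the bordered matrix and its i-th row
      have hblen :
          ((((List.map (fun _ => List.replicate w.toNat (1 : Int)) (PySem.List.pyRange 0 h)).set 0
              (List.replicate w.toNat (0 : Int))).set
              ((List.map (fun _ => List.replicate w.toNat (1 : Int)) (PySem.List.pyRange 0 h)).length - 1)
              (List.replicate w.toNat (0 : Int))).map
            (fun row => (row.set 0 0).set (w - 1).toNat 0)).length = h.toNat := by
        simp
      have hbi :
          ((((List.map (fun _ => List.replicate w.toNat (1 : Int)) (PySem.List.pyRange 0 h)).set 0
              (List.replicate w.toNat (0 : Int))).set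
              ((List.map (fun _ => List.replicate w.toNat (1 : Int)) (PySem.List.pyRange 0 h)).length - 1)
              (List.replicate w.toNat (0 : Int))).map
            (fun row => (row.set 0 0).set (w - 1).toNat 0)).getD i []
            = (((if i = 0 ∨ i = h.toNat - 1 then List.replicate w.toNat (0 : Int)
                else List.replicate w.toNat (1 : Int)).set 0 0).set (w - 1).toNat 0) := by
      
        rw [List.getD_eq_getElem _ _ (by rw [hblen]; exact hih), List.getElem_map,
          List.getElem_set, List.getElem_set]
        simp only [List.length_map, pvRange_len]
        by_cases hb0 : i = 0
        · subst hb0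
          by_cases hbl : h.toNat - 1 = 0 <;> simp [hbl]
        · by_cases hbl : i = h.toNat - 1
          · rw [if_pos (by omega), if_pos (by tauto)]
          · rw [if_neg (by omega), if_neg (by omega), if_neg (by tauto), List.getElem_map]
      simp only [hbi, hblen]
      by_cases hborder : i = 0 ∨ i = h.toNat - 1
      · -- border row: all zeros, rack loop does not touch it
        have hy : (i : Int) = 0 ∨ (i : Int) = h - 1 := by
          rcases hborder with rfl | rfl
          · left; rfl
          · right; omega
        rw [if_neg (by
          rintro ⟨hmem, -⟩
          rw [pvRackMem] at hmem
          omega)]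
        rw [if_pos hborder, List.set_replicate_self, List.set_replicate_self]
        symm
        have hc : ∀ x ∈ PySem.List.pyRange 0 w, pvCell w h (i : Int) x = 0 := by
          intro x _
          rw [pvCell_eq, if_pos (by tauto)]
        rw [List.map_congr_left hc, List.map_const', pvRange_len]
      · -- interior row
        have hi1' : 1 ≤ i := by omega
        have hi2' : (i : Int) < h - 1 := by omega
        rw [if_neg hborder]
        by_cases hmem : 2 ≤ (i : Int) ∧ (i : Int) < h - 1 ∧ (4 : Int) ∣ (i : Int) - 2
        · -- rack row
          rw [if_pos ⟨(pvRackMem h i).mpr hmem, hih⟩]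
          have hmod : PySem.Int.mod (i : Int) 4 = 2 := by
            rw [PySem.Int.mod_eq_emod_of_pos hm4]
            omega
          apply List.ext_getElem
          · unfold pvRackRow
            rw [pvCondset_length]
            simp
          · intro j hj1 hj2
            have hjw : j < w.toNat := by
              unfold pvRackRow at hj1
              rw [pvCondset_length] at hj1
              simpa using hj1
            rw [← List.getD_eq_getElem _ (0 : Int) hj1, List.getElem_map,
              pvRange_getElem w j (by rwa [pvRange_len])]
            unfold pvRackRow
            rw [pvCondset_getD]
            have hedge : (((List.replicate w.toNat (1 : Int)).set 0 0).set (w - 1).toNat 0).getD j 0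
                = if (w - 1).toNat = j ∨ j = 0 then 0 else 1 := by
              rw [List.getD_eq_getElem _ _ (by simpa using hjw), List.getElem_set,
                List.getElem_set]
              by_cases hj0 : (w - 1).toNat = j
              · simp [hj0]
              · rw [if_neg hj0]
                by_cases hjz : (0 : Nat) = j
                · simp [hjz.symm]
                · rw [if_neg hjz, if_neg (by omega), List.getElem_replicate]
            rw [hedge]
            simp only [pvInnerMem]
            rw [pvCell_eq]
            simp only [PySem.Int.mod_eq_emod_of_pos hm4]
            have hmod' : (i : Int) % 4 = 2 := by omega
            split_ifs <;> omega
        · -- plain interior row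
          rw [if_neg (by
            rintro ⟨hmm, -⟩
            rw [pvRackMem] at hmm
            exact hmem hmm)]
          have hmod : PySem.Int.mod (i : Int) 4 ≠ 2 := by
            rw [PySem.Int.mod_eq_emod_of_pos hm4]
            omega
          apply List.ext_getElem
          · simp
          · intro j hj1 hj2
            have hjw : j < w.toNat := by simpa using hj1
            rw [← List.getD_eq_getElem _ (0 : Int) hj1, List.getElem_map,
              pvRange_getElem w j (by rwa [pvRange_len])]
            have hedge : (((List.replicate w.toNat (1 : Int)).set 0 0).set (w - 1).toNat 0).getD j 0
                = if (w - 1).toNat = j ∨ j = 0 then 0 else 1 := by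
              rw [List.getD_eq_getElem _ _ (by simpa using hjw), List.getElem_set,
                List.getElem_set]
              by_cases hj0 : (w - 1).toNat = j
              · simp [hj0]
              · rw [if_neg hj0]
                by_cases hjz : (0 : Nat) = j
                · simp [hjz.symm]
                · rw [if_neg hjz, if_neg (by omega), List.getElem_replicate]
            rw [hedge, pvCell_eq]
            simp only [PySem.Int.mod_eq_emod_of_pos hm4]
            rw [PySem.Int.mod_eq_emod_of_pos hm4] at hmod
            split_ifs <;> omega
    · -- width (or height) not positive: every row is empty
      rw [if_neg hpos]
      have hw0 : w.toNat = 0 := by omega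
      have hgd : (List.map (fun _ => List.replicate w.toNat (1 : Int))
          (PySem.List.pyRange 0 h)).getD i [] = [] := by
        rw [List.getD_eq_getElem _ _ (by simpa [pvRange_len] using hih), List.getElem_map,
          hw0, List.replicate_zero]
      rw [hgd]
      have hrhs : (PySem.List.pyRange 0 w).map (pvCell w h (i : Int)) = [] := by
        rw [pvRange_zero, hw0]
        rfl
      rw [hrhs]
      split_ifs
      · rw [pvRack_empty w (by omega)]
      · rfl

-- ===== VERDICT (by name: the statement is the Claim_ definition above) =====
theorem generate_warehouse_small_matrix_spec : Claim_equal_generate_warehouse_small_matrix := by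
  intro width height _
  unfold Spec_generate_warehouse_small_matrix
  rw [pvA_eq_map, pvB_eq_map]
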